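-- pv_equiv track=rewrite | github.com/phatakshaunak/scaler_academy | DSA_Problem_Solving/Greedy_Algorithms/free_cars.py | solve
-- ===== SOURCE A (Python) =====
-- import heapq
--
-- def solve(A, B):
--     tmp = []
--     n = len(A)
--     tmp1 = [[A[i], B[i], i] for i in range(n)]
--
--     # Sort by buying time
--     tmp1.sort()
--
--     # Rearrange for heapifying. If profits are the same, sort on index, as time and profit can have duplicates)
--     tmp1 = [[t[1], t[2], t[0]] for t in tmp1]
--
--     T = 0
--
--     for val in tmp1:
--
--         p, idx, t = val
--
--         # Valid time to buy a car
--         if T <= t - 1: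
--             heapq.heappush(tmp, val)
--             T += 1
--
--         #Find if incoming value is greater than min element in heap. Replace if true
--         else:
--             top = tmp[0]
--             if top[0] < p:
--                 heapq.heappop(tmp)
--                 heapq.heappush(tmp, val)
--
--     ans = 0
--     for tup in tmp:
--         ans += tup[0]
--
--     return ans % int(1e9+7)
-- ===== SOURCE B (Python) =====
-- def _ins(sel, p):
--     # insert p into ascending-sorted list sel, returning a new sorted list
--     if not sel or p <= sel[0]:
--         return [p] + sel
--     return [sel[0]] + _ins(sel[1:], p)
--
-- def solve(A, B):
--     jobs = sorted(zip(A, B))          # (time, profit), lexicographic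
--     sel = []                          # ascending-sorted profits of the chosen cars
--     for t, p in jobs:
--         if len(sel) <= t - 1:
--             sel = _ins(sel, p)
--         elif sel[0] < p:
--             sel = _ins(sel[1:], p)
--     return sum(sel) % (10 ** 9 + 7)
-- ===== Notes on version B (the rewrite author's own statement) =====
-- stated objective: simpler
-- what changed: Replaces the index-decorated triple list and the binary min-heap of [profit,index,time] triples by a plain ascending insertion list of profits: B sorts zip(A,B) directly, keeps only the chosen profits in a sorted list (its head is the minimum the heap's root provided), and sums that list.
import Mathlib
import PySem

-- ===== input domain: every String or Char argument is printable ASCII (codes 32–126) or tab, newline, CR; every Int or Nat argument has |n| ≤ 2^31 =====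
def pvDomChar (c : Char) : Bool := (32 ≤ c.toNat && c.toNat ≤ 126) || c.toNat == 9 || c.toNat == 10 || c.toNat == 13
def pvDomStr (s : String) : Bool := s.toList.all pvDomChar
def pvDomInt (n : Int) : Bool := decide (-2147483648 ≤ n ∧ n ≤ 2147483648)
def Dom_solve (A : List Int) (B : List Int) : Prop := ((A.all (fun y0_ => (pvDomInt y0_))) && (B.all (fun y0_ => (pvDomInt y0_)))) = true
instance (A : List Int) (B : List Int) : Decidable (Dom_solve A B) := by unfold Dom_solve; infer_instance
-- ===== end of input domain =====

-- B replaces A's min-heap of [profit, index, time] triples by a plain ascending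
-- insertion list of the chosen profits (its head is the minimum A's heap root provides);
-- same return value, no claim about speed.

-- ===== PORT A =====

-- Python's `<` on two 3-element int lists (lexicographic); exact for the length-3 lists A builds
def pvLt3 (a b : Int × Int × Int) : Bool :=
  decide (a.1 < b.1 ∨ (a.1 = b.1 ∧ (a.2.1 < b.2.1 ∨ (a.2.1 = b.2.1 ∧ a.2.2 < b.2.2))))

-- heapq's binary min-heap ported as a mergeable min-heap tree over the same `<`:
-- heappush/heappop keep exactly the multiset of entries with the minimum at the root,
-- which is all `tmp[0]`, push, pop and the final sum observe.
inductive PvHeap where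
  | nil : PvHeap
  | node : (Int × Int × Int) → PvHeap → PvHeap → PvHeap
deriving DecidableEq, Repr

def pvHeapMerge : PvHeap → PvHeap → PvHeap
  | .nil, h => h
  | .node v l r, .nil => .node v l r
  | .node v1 l1 r1, .node v2 l2 r2 =>
    if pvLt3 v2 v1 then .node v2 (pvHeapMerge (.node v1 l1 r1) r2) l2
    else .node v1 (pvHeapMerge (.node v2 l2 r2) r1) l1
termination_by h1 h2 => sizeOf h1 + sizeOf h2
decreasing_by all_goals (simp; try omega)

def pvHeapToList : PvHeap → List (Int × Int × Int)
  | .nil => []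
  | .node v l r => v :: (pvHeapToList l ++ pvHeapToList r)

def solve (A : List Int) (B : List Int) : Int :=
  let n := A.length
  -- [[A[i], B[i], i] for i in range(n)]; B[i] raises IndexError when len(B) < len(A): excluded by Pre_solve
  let tmp1 : List (Int × Int × Int) :=
    (List.range n).map (fun (i : Nat) => (PySem.List.pyGetD A (i : Int) 0, PySem.List.pyGetD B (i : Int) 0, (i : Int)))
  -- tmp1.sort(): stable insertion sort under Python's list `<` (pvLt3), as PySem.List.sorted sorts
  let tmp1s := tmp1.foldl (fun acc x => PySem.List.insertBy pvLt3 x acc) []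
  let tmp2 := tmp1s.map (fun t => (t.2.1, t.2.2, t.1))
  let st := tmp2.foldl (fun (st : PvHeap × Int) val =>
    let p := val.1
    let t := val.2.2
    if st.2 ≤ t - 1 then (pvHeapMerge st.1 (.node val .nil .nil), st.2 + 1)
    else
      match st.1 with
      | .nil => st            -- Python raises IndexError on tmp[0] here; excluded by Pre_solve
      | .node top l r =>
        if top.1 < p then (pvHeapMerge (pvHeapMerge l r) (.node val .nil .nil), st.2) else st)
    (.nil, 0)
  let ans := (pvHeapToList st.1).foldl (fun a tup => a + tup.1) 0
  PySem.Int.mod ans 1000000007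

-- ===== PORT B =====

def pvIns (sel : List Int) (p : Int) : List Int :=
  match sel with
  | [] => [p]
  | x :: rest => if p ≤ x then p :: x :: rest else x :: pvIns rest p

def solve_alt (A : List Int) (B : List Int) : Int :=
  let jobs := PySem.List.sorted2 (A.zip B) Prod.fst Prod.snd
  let sel := jobs.foldl (fun sel tp =>
    if (sel.length : Int) ≤ tp.1 - 1 then pvIns sel tp.2
    else
      match sel with
      | [] => sel             -- Python raises IndexError on sel[0] here; excluded by Pre_solve
      | m :: rest => if m < tp.2 then pvIns rest tp.2 else sel) []
  PySem.Int.mod sel.sum 1000000007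

-- ===== PRECONDITION & SPEC =====

-- A raises IndexError when len(B) < len(A) (B[i] inside the comprehension) or when some
-- buying time in A is ≤ 0 (tmp[0] on the empty heap); Pre_solve excludes exactly those inputs.
def Pre_solve (A : List Int) (B : List Int) : Prop :=
  A.length ≤ B.length ∧ ∀ t ∈ A, 1 ≤ t
instance (A : List Int) (B : List Int) : Decidable (Pre_solve A B) := by unfold Pre_solve; infer_instance

def pvWitness_solve : List Int × List Int := ([2, 1, 2], [3, -1, 5])

def Spec_solve (A : List Int) (B : List Int) (out : Int) : Prop := out = solve_alt A B
instance (A : List Int) (B : List Int) (out : Int) : Decidable (Spec_solve A B out) := by unfold Spec_solve; infer_instance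

-- ===== CLAIM (what is proved, stated in full; the proofs are below) =====
def Claim_equal_solve : Prop := ∀ (A : List Int) (B : List Int), Dom_solve A B → Pre_solve A B → Spec_solve A B (solve A B)

-- ===== LEMMAS AND PROOFS =====

-- ---- order facts about pvLt3 and the pair order ----

def pvR (a b : Int × Int) : Prop := a.1 < b.1 ∨ (a.1 = b.1 ∧ a.2 ≤ b.2)

lemma pvLt3_asymm (a b : Int × Int × Int) (h : pvLt3 a b = true) : pvLt3 b a = false := by
  simp [pvLt3] at *; omega

lemma pvLe3_trans (a b c : Int × Int × Int)
    (h1 : pvLt3 b a = false) (h2 : pvLt3 c b = false) : pvLt3 c a = false := by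
  simp [pvLt3] at *; omega

lemma pvLe3_fst (x v : Int × Int × Int) (h : pvLt3 x v = false) : v.1 ≤ x.1 := by
  simp [pvLt3] at h; omega

lemma pvLe3_pvR (a b : Int × Int × Int) (h : pvLt3 b a = false) : pvR (a.1, a.2.1) (b.1, b.2.1) := by
  simp [pvLt3] at h; simp [pvR]; omega

-- ---- generic facts about PySem.List.insertBy used with a strict Bool order ----

lemma pvInsertBy_cons {α : Type} (before : α → α → Bool) (x y : α) (ys : List α) :
    PySem.List.insertBy before x (y :: ys) =
      if before x y then x :: y :: ys else y :: PySem.List.insertBy before x ys := by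
  simp [PySem.List.insertBy]

lemma pvInsertBy_perm {α : Type} (before : α → α → Bool) (x : α) (ys : List α) :
    (PySem.List.insertBy before x ys).Perm (x :: ys) := by
  induction ys with
  | nil => simp [PySem.List.insertBy]
  | cons y ys ih =>
    rw [pvInsertBy_cons]
    split
    · exact List.Perm.refl _
    · exact (List.Perm.cons y ih).trans (List.Perm.swap x y ys)

lemma pvFoldl_insertBy_perm {α : Type} (before : α → α → Bool) (l acc : List α) :
    (l.foldl (fun acc x => PySem.List.insertBy before x acc) acc).Perm (acc ++ l) := by
  induction l generalizing acc with
  | nil => simp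
  | cons x l ih =>
    refine (ih (PySem.List.insertBy before x acc)).trans ?_
    refine ((pvInsertBy_perm before x acc).append_right l).trans ?_
    simpa using (List.perm_middle (a := x) (l₁ := acc) (l₂ := l)).symm

lemma pvInsertBy_pairwise {α : Type} (S : α → α → Prop) (before : α → α → Bool)
    (htr : ∀ a b c, S a b → S b c → S a c)
    (h1 : ∀ a b, before a b = true → S a b) (h2 : ∀ a b, before a b = false → S b a)
    (x : α) (ys : List α) (hys : ys.Pairwise S) :
    (PySem.List.insertBy before x ys).Pairwise S := by
  induction ys with
  | nil => simp [PySem.List.insertBy]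
  | cons y ys ih =>
    rw [pvInsertBy_cons]
    rcases List.pairwise_cons.mp hys with ⟨hy, hys'⟩
    split
    · rename_i hb
      refine List.pairwise_cons.mpr ⟨?_, hys⟩
      intro z hz
      rcases (by simpa using hz : z = y ∨ z ∈ ys) with rfl | hz'
      · exact h1 _ _ hb
      · exact htr _ _ _ (h1 _ _ hb) (hy _ hz')
    · rename_i hb
      refine List.pairwise_cons.mpr ⟨?_, ih hys'⟩
      intro z hz
      rcases (by simpa using (pvInsertBy_perm before x ys).mem_iff.mp hz : z = x ∨ z ∈ ys) with rfl | hz'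
      · exact h2 _ _ (by simpa using hb)
      · exact hy _ hz'

lemma pvFoldl_insertBy_pairwise {α : Type} (S : α → α → Prop) (before : α → α → Bool)
    (htr : ∀ a b c, S a b → S b c → S a c)
    (h1 : ∀ a b, before a b = true → S a b) (h2 : ∀ a b, before a b = false → S b a)
    (l acc : List α) (hacc : acc.Pairwise S) :
    (l.foldl (fun acc x => PySem.List.insertBy before x acc) acc).Pairwise S := by
  induction l generalizing acc with
  | nil => simpa
  | cons x l ih => exact ih _ (pvInsertBy_pairwise S before htr h1 h2 x acc hacc)

-- ---- the pair order used to identify the two sorts ----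

lemma pvR_antisymm (a b : Int × Int) (h1 : pvR a b) (h2 : pvR b a) : a = b := by
  obtain ⟨a1, a2⟩ := a; obtain ⟨b1, b2⟩ := b; simp [pvR] at *; omega

def pvLt2 (a b : Int × Int) : Bool :=
  decide (a.1 < b.1) || (!decide (b.1 < a.1) && decide (a.2 < b.2))

lemma pvLt2_asymm (a b : Int × Int) (h : pvLt2 a b = true) : pvLt2 b a = false := by
  simp [pvLt2] at *; omega

lemma pvLe2_trans (a b c : Int × Int) (h1 : pvLt2 b a = false) (h2 : pvLt2 c b = false) :
    pvLt2 c a = false := by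
  simp [pvLt2] at *; omega

lemma pvLe2_pvR (a b : Int × Int) (h : pvLt2 b a = false) : pvR a b := by
  simp [pvLt2] at h; simp [pvR]; omega

-- ---- heap facts ----

def pvHeapOk : PvHeap → Prop
  | .nil => True
  | .node v l r => (∀ x ∈ pvHeapToList l, pvLt3 x v = false) ∧
      (∀ x ∈ pvHeapToList r, pvLt3 x v = false) ∧ pvHeapOk l ∧ pvHeapOk r

lemma pvMerge_toList (h1 h2 : PvHeap) :
    (↑(pvHeapToList (pvHeapMerge h1 h2)) : Multiset (Int × Int × Int)) =
      ↑(pvHeapToList h1) + ↑(pvHeapToList h2) := by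
  fun_induction pvHeapMerge with
  | case1 h => simp [pvHeapToList]
  | case2 v l r => simp [pvHeapToList]
  | case3 v1 l1 r1 v2 l2 r2 hlt ih =>
    simp only [pvHeapToList, ← Multiset.cons_coe, ← Multiset.coe_add] at *
    rw [ih]
    simp only [← Multiset.singleton_add]
    abel
  | case4 v1 l1 r1 v2 l2 r2 hlt ih =>
    simp only [pvHeapToList, ← Multiset.cons_coe, ← Multiset.coe_add] at *
    rw [ih]
    simp only [← Multiset.singleton_add]
    abel

lemma pvMem_merge (h1 h2 : PvHeap) (x : Int × Int × Int) :
    x ∈ pvHeapToList (pvHeapMerge h1 h2) ↔ x ∈ pvHeapToList h1 ∨ x ∈ pvHeapToList h2 := by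
  have := pvMerge_toList h1 h2
  constructor
  · intro hx
    have : x ∈ (↑(pvHeapToList h1) + ↑(pvHeapToList h2) : Multiset _) := by
      rw [← this]; simpa using hx
    simpa using this
  · intro hx
    have : x ∈ (↑(pvHeapToList (pvHeapMerge h1 h2)) : Multiset _) := by
      rw [this]; simpa using hx
    simpa using this

lemma pvMem_node (v : Int × Int × Int) (l r : PvHeap) (x : Int × Int × Int) :
    x ∈ pvHeapToList (.node v l r) ↔ x = v ∨ x ∈ pvHeapToList l ∨ x ∈ pvHeapToList r := by
  simp [pvHeapToList]

lemma pvMerge_ok (h1 h2 : PvHeap) :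
    pvHeapOk h1 → pvHeapOk h2 → pvHeapOk (pvHeapMerge h1 h2) := by
  fun_induction pvHeapMerge with
  | case1 h => exact fun _ o2 => o2
  | case2 v l r => exact fun o1 _ => o1
  | case3 v1 l1 r1 v2 l2 r2 hlt ih =>
    intro o1 o2
    obtain ⟨hl2, hr2, ol2, or2⟩ := o2
    refine ⟨?_, hl2, ih o1 or2, ol2⟩
    intro x hx
    rcases (pvMem_merge _ _ x).mp hx with hx1 | hx2
    · rcases (pvMem_node _ _ _ _).mp hx1 with rfl | hmem | hmem
      · exact pvLt3_asymm _ _ hlt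
      · exact pvLe3_trans _ _ _ (pvLt3_asymm _ _ hlt) (o1.1 x hmem)
      · exact pvLe3_trans _ _ _ (pvLt3_asymm _ _ hlt) (o1.2.1 x hmem)
    · exact hr2 x hx2
  | case4 v1 l1 r1 v2 l2 r2 hlt ih =>
    intro o1 o2
    obtain ⟨hl1, hr1, ol1, or1⟩ := o1
    refine ⟨?_, hl1, ih o2 or1, ol1⟩
    intro x hx
    rcases (pvMem_merge _ _ x).mp hx with hx2 | hx1
    · rcases (pvMem_node _ _ _ _).mp hx2 with rfl | hmem | hmem
      · simpa using hlt
      · exact pvLe3_trans _ _ _ (by simpa using hlt) (o2.1 x hmem)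
      · exact pvLe3_trans _ _ _ (by simpa using hlt) (o2.2.1 x hmem)
    · exact hr1 x hx1

lemma pvOk_min (v : Int × Int × Int) (l r : PvHeap) (ok : pvHeapOk (.node v l r)) :
    ∀ x ∈ pvHeapToList (.node v l r), v.1 ≤ x.1 := by
  obtain ⟨hl, hr, _, _⟩ := ok
  intro x hx
  rcases (pvMem_node _ _ _ _).mp hx with rfl | hmem | hmem
  · omega
  · exact pvLe3_fst _ _ (hl x hmem)
  · exact pvLe3_fst _ _ (hr x hmem)

def pvProfits (h : PvHeap) : Multiset Int :=
  Multiset.map (fun v => v.1) (↑(pvHeapToList h) : Multiset (Int × Int × Int))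

lemma pvProfits_merge (h1 h2 : PvHeap) :
    pvProfits (pvHeapMerge h1 h2) = pvProfits h1 + pvProfits h2 := by
  simp [pvProfits, pvMerge_toList]

lemma pvProfits_node (v : Int × Int × Int) (l r : PvHeap) :
    pvProfits (.node v l r) = v.1 ::ₘ (pvProfits l + pvProfits r) := by
  simp [pvProfits, pvHeapToList]

lemma pvProfits_single (v : Int × Int × Int) : pvProfits (.node v .nil .nil) = {v.1} := by
  simp [pvProfits, pvHeapToList]

-- ---- pvIns facts ----

lemma pvIns_multiset (sel : List Int) (p : Int) :
    (↑(pvIns sel p) : Multiset Int) = p ::ₘ ↑sel := by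
  induction sel with
  | nil => simp [pvIns]
  | cons x rest ih =>
    simp only [pvIns]
    split
    · rfl
    · simp only [← Multiset.cons_coe, ih, Multiset.cons_swap]

lemma pvIns_length (sel : List Int) (p : Int) : (pvIns sel p).length = sel.length + 1 := by
  have := congrArg Multiset.card (pvIns_multiset sel p)
  simpa using this

lemma pvIns_pairwise (sel : List Int) (p : Int) (h : sel.Pairwise (· ≤ ·)) :
    (pvIns sel p).Pairwise (· ≤ ·) := by
  induction sel with
  | nil => simp [pvIns]
  | cons x rest ih =>
    rcases List.pairwise_cons.mp h with ⟨hx, hrest⟩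
    simp only [pvIns]
    split
    · rename_i hple
      refine List.pairwise_cons.mpr ⟨?_, h⟩
      intro z hz
      rcases (by simpa using hz : z = x ∨ z ∈ rest) with rfl | hz'
      · exact hple
      · exact le_trans hple (hx _ hz')
    · rename_i hple
      refine List.pairwise_cons.mpr ⟨?_, ih hrest⟩
      intro z hz
      have hz2 : z ∈ (↑(pvIns rest p) : Multiset Int) := by simpa using hz
      rw [pvIns_multiset] at hz2
      rcases (by simpa using hz2 : z = p ∨ z ∈ rest) with rfl | hz'
      · omega
      · exact hx _ hz'

lemma pvHead_min (m : Int) (rest : List Int) (h : (m :: rest).Pairwise (· ≤ ·)) :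
    ∀ x ∈ m :: rest, m ≤ x := by
  rcases List.pairwise_cons.mp h with ⟨hm, _⟩
  intro x hx
  rcases (by simpa using hx : x = m ∨ x ∈ rest) with rfl | hx'
  · exact le_refl x
  · exact hm x hx'

-- ---- the two step functions (the exact fold bodies of the two ports) ----

def pvStepA : (PvHeap × Int) → (Int × Int × Int) → (PvHeap × Int) := fun st val =>
  let p := val.1
  let t := val.2.2
  if st.2 ≤ t - 1 then (pvHeapMerge st.1 (.node val .nil .nil), st.2 + 1)
  else
    match st.1 with
    | .nil => st
    | .node top l r =>
      if top.1 < p then (pvHeapMerge (pvHeapMerge l r) (.node val .nil .nil), st.2) else st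

def pvStepB : List Int → (Int × Int) → List Int := fun sel tp =>
  if (sel.length : Int) ≤ tp.1 - 1 then pvIns sel tp.2
  else
    match sel with
    | [] => sel
    | m :: rest => if m < tp.2 then pvIns rest tp.2 else sel

-- one step preserves the coupling between A's (heap, T) and B's sorted profit list
lemma pvStep_inv (v : Int × Int × Int) (hv : 1 ≤ v.2.2) (h : PvHeap) (T : Int) (sel : List Int)
    (ok : pvHeapOk h) (hs : sel.Pairwise (· ≤ ·)) (hm : pvProfits h = ↑sel)
    (hT : T = (sel.length : Int)) :
    pvHeapOk (pvStepA (h, T) v).1 ∧ (pvStepB sel (v.2.2, v.1)).Pairwise (· ≤ ·) ∧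
      pvProfits (pvStepA (h, T) v).1 = ↑(pvStepB sel (v.2.2, v.1)) ∧
      (pvStepA (h, T) v).2 = ((pvStepB sel (v.2.2, v.1)).length : Int) := by
  subst hT
  have hsingle : pvHeapOk (.node v .nil .nil) := ⟨by simp [pvHeapToList], by simp [pvHeapToList], trivial, trivial⟩
  by_cases hc : (sel.length : Int) ≤ v.2.2 - 1
  · simp only [pvStepA, pvStepB, if_pos hc]
    refine ⟨pvMerge_ok _ _ ok hsingle, pvIns_pairwise _ _ hs, ?_, ?_⟩
    · rw [pvProfits_merge, pvProfits_single, hm, pvIns_multiset, add_comm, Multiset.singleton_add]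
    · simp [pvIns_length]
  · have hlen1 : 1 ≤ (sel.length : Int) := by omega
    obtain ⟨m, rest, rfl⟩ : ∃ m rest, sel = m :: rest := by
      cases sel with
      | nil => simp at hlen1
      | cons m rest => exact ⟨m, rest, rfl⟩
    obtain ⟨top, l, r, rfl⟩ : ∃ top l r, h = PvHeap.node top l r := by
      cases h with
      | nil =>
        exfalso
        have : (0 : Multiset Int) = ↑(m :: rest) := by
          simpa [pvProfits, pvHeapToList] using hm
        simp [← Multiset.cons_coe] at this
      | node top l r => exact ⟨top, l, r, rfl⟩
    have htop : top.1 = m := by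
      have hub : ∀ x ∈ pvHeapToList (.node top l r), top.1 ≤ x.1 := pvOk_min top l r ok
      have h1 : top.1 ∈ (↑(m :: rest) : Multiset Int) := by
        rw [← hm]
        simp only [pvProfits, Multiset.mem_map, Multiset.mem_coe]
        exact ⟨top, (pvMem_node _ _ _ _).mpr (Or.inl rfl), rfl⟩
      have h2 : m ≤ top.1 := pvHead_min m rest hs top.1 (by simpa using h1)
      have h3 : m ∈ pvProfits (.node top l r) := by rw [hm]; simp
      have h4 : top.1 ≤ m := by
        simp only [pvProfits, Multiset.mem_map, Multiset.mem_coe] at h3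
        obtain ⟨x, hx, rfl⟩ := h3
        exact hub x hx
      omega
    have hrest : pvProfits l + pvProfits r = ↑rest := by
      rw [pvProfits_node, htop, ← Multiset.cons_coe] at hm
      exact (Multiset.cons_inj_right m).mp hm
    have hrest_pw : rest.Pairwise (· ≤ ·) := (List.pairwise_cons.mp hs).2
    by_cases hcp : m < v.1
    · simp only [pvStepA, pvStepB, if_neg hc, htop, if_pos hcp]
      refine ⟨pvMerge_ok _ _ (pvMerge_ok _ _ ok.2.2.1 ok.2.2.2) hsingle,
        pvIns_pairwise _ _ hrest_pw, ?_, ?_⟩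
      · rw [pvProfits_merge, pvProfits_merge, pvProfits_single, hrest, pvIns_multiset,
          add_comm, Multiset.singleton_add]
      · simp [pvIns_length]
    · simp only [pvStepA, pvStepB, if_neg hc, htop, if_neg hcp]
      exact ⟨ok, hs, hm, by simp⟩

-- the coupled fold
lemma pvInv (l : List (Int × Int × Int)) (hts : ∀ v ∈ l, 1 ≤ v.2.2) (h : PvHeap) (T : Int)
    (sel : List Int) (ok : pvHeapOk h) (hs : sel.Pairwise (· ≤ ·)) (hm : pvProfits h = ↑sel)
    (hT : T = (sel.length : Int)) :
    pvProfits (l.foldl pvStepA (h, T)).1 =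
      ↑((l.map (fun v => (v.2.2, v.1))).foldl pvStepB sel) := by
  induction l generalizing h T sel with
  | nil => simpa using hm
  | cons v l ih =>
    obtain ⟨o1, p1, m1, t1⟩ := pvStep_inv v (hts v (by simp)) h T sel ok hs hm hT
    have := ih (fun w hw => hts w (by simp [hw])) (pvStepA (h, T) v).1 (pvStepA (h, T) v).2
      (pvStepB sel (v.2.2, v.1)) o1 p1 m1 t1
    simpa using this

-- ---- aligning the two sorted job lists ----

lemma pvFoldl_fst_sum (L : List (Int × Int × Int)) :
    L.foldl (fun a tup => a + tup.1) 0 = (L.map (fun v => v.1)).sum := by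
  rw [List.sum_eq_foldl, List.foldl_map]

lemma pvZip (A B : List Int) (h : A.length ≤ B.length) :
    (List.range A.length).map (fun i => (A.getD i 0, B.getD i 0)) = A.zip B := by
  apply List.ext_getElem
  · simp; omega
  · intro i h1 h2
    have hiA : i < A.length := by simpa using h1
    simp only [List.getElem_map, List.getElem_range, List.getElem_zip]
    rw [List.getD_eq_getElem _ _ hiA, List.getD_eq_getElem _ _ (lt_of_lt_of_le hiA h)]

lemma pvSorted2_eq (xs : List (Int × Int)) :
    PySem.List.sorted2 xs Prod.fst Prod.snd =
      xs.foldl (fun acc x => PySem.List.insertBy pvLt2 x acc) [] := rfl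

lemma pvJobs (A B : List Int) (h : A.length ≤ B.length) :
    (((List.range A.length).map (fun (i : Nat) =>
        (PySem.List.pyGetD A (i : Int) 0, PySem.List.pyGetD B (i : Int) 0, (i : Int)))).foldl
        (fun acc x => PySem.List.insertBy pvLt3 x acc) []).map (fun u => (u.1, u.2.1)) =
      PySem.List.sorted2 (A.zip B) Prod.fst Prod.snd := by
  set f : Nat → Int × Int × Int := fun (i : Nat) =>
    (PySem.List.pyGetD A (i : Int) 0, PySem.List.pyGetD B (i : Int) 0, (i : Int)) with hf
  set tmp1 := (List.range A.length).map f with htmp1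
  have hmapzip : tmp1.map (fun u => (u.1, u.2.1)) = A.zip B := by
    rw [htmp1, List.map_map]
    have hfun : ((fun (u : Int × Int × Int) => (u.1, u.2.1)) ∘ f) =
        fun i => ((A.getD i 0 : Int), (B.getD i 0 : Int)) := by
      funext i; simp [hf]
    rw [hfun]
    exact pvZip A B h
  have hperm : ((tmp1.foldl (fun acc x => PySem.List.insertBy pvLt3 x acc) []).map
      (fun u => (u.1, u.2.1))).Perm (PySem.List.sorted2 (A.zip B) Prod.fst Prod.snd) := by
    refine ((pvFoldl_insertBy_perm pvLt3 tmp1 []).map _).trans ?_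
    rw [List.nil_append, hmapzip]
    exact (PySem.List.sorted2_perm (A.zip B) Prod.fst Prod.snd false).symm
  refine List.Perm.eq_of_pairwise (le := pvR) (fun a b _ _ hab hba => pvR_antisymm a b hab hba)
    ?_ ?_ hperm
  · exact List.pairwise_map.mpr
      ((pvFoldl_insertBy_pairwise (fun a b => pvLt3 b a = false) pvLt3
          (fun a b c hab hbc => pvLe3_trans a b c hab hbc)
          (fun a b hb => pvLt3_asymm a b hb) (fun a b hb => hb) tmp1 [] (by simp)).imp
        (fun hab => pvLe3_pvR _ _ hab))
  · rw [pvSorted2_eq]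
    exact (pvFoldl_insertBy_pairwise (fun a b => pvLt2 b a = false) pvLt2
        (fun a b c hab hbc => pvLe2_trans a b c hab hbc)
        (fun a b hb => pvLt2_asymm a b hb) (fun a b hb => hb) (A.zip B) [] (by simp)).imp
      (fun hab => pvLe2_pvR _ _ hab)

-- ===== VERDICT (by name: the statement is the Claim_ definition above) =====
theorem solve_spec : Claim_equal_solve := by
  intro A B _ hpre
  obtain ⟨hlen, hts⟩ := hpre
  show solve A B = solve_alt A B
  have hA : solve A B = PySem.Int.mod
      ((pvHeapToList (((((List.range A.length).map (fun (i : Nat) =>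
          (PySem.List.pyGetD A (i : Int) 0, PySem.List.pyGetD B (i : Int) 0, (i : Int)))).foldl
          (fun acc x => PySem.List.insertBy pvLt3 x acc) []).map
          (fun t => (t.2.1, t.2.2, t.1))).foldl pvStepA (PvHeap.nil, 0)).1).foldl
        (fun a tup => a + tup.1) 0) 1000000007 := rfl
  have hB : solve_alt A B = PySem.Int.mod
      (((PySem.List.sorted2 (A.zip B) Prod.fst Prod.snd).foldl pvStepB []).sum) 1000000007 := rfl
  rw [hA, hB]
  set tmp1 := (List.range A.length).map (fun (i : Nat) =>
      (PySem.List.pyGetD A (i : Int) 0, PySem.List.pyGetD B (i : Int) 0, (i : Int))) with htmp1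
  set tmp1s := tmp1.foldl (fun acc x => PySem.List.insertBy pvLt3 x acc) [] with htmp1s
  set tmp2 := tmp1s.map (fun t => (t.2.1, t.2.2, t.1)) with htmp2
  have hts2 : ∀ v ∈ tmp2, 1 ≤ v.2.2 := by
    intro v hv
    rw [htmp2] at hv
    obtain ⟨u, hu, rfl⟩ := List.mem_map.mp hv
    have hu1 : u ∈ tmp1 := (pvFoldl_insertBy_perm pvLt3 tmp1 []).mem_iff.mp (by simpa using hu)
    rw [htmp1] at hu1
    obtain ⟨i, hi, rfl⟩ := List.mem_map.mp hu1
    have hiA : i < A.length := List.mem_range.mp hi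
    show 1 ≤ PySem.List.pyGetD A (i : Int) 0
    have : PySem.List.pyGetD A (i : Int) 0 = A[i] := by
      simp [PySem.List.pyGetD_natCast, List.getD, List.getElem?_eq_getElem hiA]
    rw [this]
    exact hts _ (List.getElem_mem hiA)
  have hmain := pvInv tmp2 hts2 PvHeap.nil 0 [] trivial (by simp)
    (by simp [pvProfits, pvHeapToList]) (by simp)
  have halign : tmp2.map (fun v => (v.2.2, v.1)) =
      PySem.List.sorted2 (A.zip B) Prod.fst Prod.snd := by
    rw [htmp2, List.map_map]
    exact pvJobs A B hlen
  rw [halign] at hmain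
  -- both final values are the sum of the same multiset of profits
  have hsum := congrArg Multiset.sum hmain
  rw [pvProfits] at hsum
  simp only [Multiset.map_coe, Multiset.sum_coe] at hsum
  rw [pvFoldl_fst_sum, hsum]
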